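-- pv_equiv track=rewrite | github.com/WorryingWonton/PyBats | array_3.py | countClumps
-- ===== SOURCE A (Python) =====
-- def countClumps(nums):
--     clumps = 0
--     index = 0
--     while index < len(nums):
--         temp = nums[index]
--         count = 0
--         while index < len(nums) and temp == nums[index]:
--             count += 1
--             index += 1
--         clumps += (1 if count > 1 else 0)
--     return clumps
-- ===== SOURCE B (Python) =====
-- def countClumps(nums):
--     clumps = 0
--     counted = False
--     for prev, cur in zip(nums, nums[1:]):
--         if cur == prev:
--             if not counted:
--                 clumps += 1
--                 counted = True
--         else:
--             counted = False
--     return clumps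
-- ===== Notes on version B (the rewrite author's own statement) =====
-- stated objective: simpler
-- what changed: Replaces A's nested while loops (outer run selection, inner run-length count with manual index bookkeeping) by one flat pass over adjacent pairs (zip) with a boolean 'already counted this run' flag.
import Mathlib
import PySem

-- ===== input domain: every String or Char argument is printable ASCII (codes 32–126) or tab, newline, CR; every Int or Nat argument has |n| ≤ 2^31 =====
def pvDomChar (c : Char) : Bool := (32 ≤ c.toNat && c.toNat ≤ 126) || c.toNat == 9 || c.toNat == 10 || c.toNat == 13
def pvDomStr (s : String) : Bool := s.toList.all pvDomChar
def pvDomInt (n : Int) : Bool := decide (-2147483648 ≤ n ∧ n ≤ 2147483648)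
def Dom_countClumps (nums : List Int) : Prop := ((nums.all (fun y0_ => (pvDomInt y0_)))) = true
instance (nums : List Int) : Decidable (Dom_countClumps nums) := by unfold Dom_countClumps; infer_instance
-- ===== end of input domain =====

-- B replaces A's nested while loops by one flat pass over adjacent pairs with a 'counted' flag (objective: simpler).

-- ===== PORT A =====
-- inner while of A: temp = nums[index] fixed; consumes leading elements equal to temp,
-- returns (number consumed, remaining list). In A the first inner iteration always fires
-- (temp == nums[index]), so the port runs the inner loop on the tail and adds that first step as 1 + _.
def chompA (temp : Int) : List Int → Int × List Int
  | [] => (0, [])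
  | y :: ys => if temp = y then ((chompA temp ys).1 + 1, (chompA temp ys).2) else (0, y :: ys)

theorem chompA_len (temp : Int) (l : List Int) : (chompA temp l).2.length ≤ l.length := by
  induction l with
  | nil => simp [chompA]
  | cons y ys ih =>
    simp only [chompA]
    split <;> simp_all <;> omega

-- outer while of A
def countClumps (nums : List Int) : Int :=
  match nums with
  | [] => 0
  | x :: xs =>
    let p := chompA x xs
    (if 1 + p.1 > 1 then (1 : Int) else 0) + countClumps p.2
termination_by nums.length
decreasing_by
  have := chompA_len x xs
  simp only [List.length_cons]; omega

-- ===== PORT B =====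
-- one step of B's loop over (prev, cur) pairs; state = (clumps, counted)
def stepB (s : Int × Bool) (pr : Int × Int) : Int × Bool :=
  if pr.2 = pr.1 then (if s.2 = false then (s.1 + 1, true) else s) else (s.1, false)

-- zip(nums, nums[1:]); nums[1:] = drop 1 (exact for this nonnegative slice)
def countClumps_alt (nums : List Int) : Int :=
  ((nums.zip (nums.drop 1)).foldl stepB (0, false)).1

-- ===== PRECONDITION & SPEC =====
def Spec_countClumps (nums : List Int) (out : Int) : Prop := out = countClumps_alt nums
instance (nums : List Int) (out : Int) : Decidable (Spec_countClumps nums out) := by unfold Spec_countClumps; infer_instance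

-- ===== CLAIM (what is proved, stated in full; the proofs are below) =====
def Claim_equal_countClumps : Prop := ∀ (nums : List Int), Dom_countClumps nums → Spec_countClumps nums (countClumps nums)

-- ===== LEMMAS AND PROOFS =====

theorem countClumps_nil : countClumps [] = 0 := by rw [countClumps]

theorem countClumps_cons (x : Int) (xs : List Int) :
    countClumps (x :: xs)
      = (if 1 + (chompA x xs).1 > 1 then (1:Int) else 0) + countClumps (chompA x xs).2 := by
  rw [countClumps]

-- proof-side recursive view of B's fold, carrying the previous element explicitly
def runB (prev : Int) (flag : Bool) (acc : Int) : List Int → Int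
  | [] => acc
  | y :: ys =>
    if y = prev then
      (if flag = false then runB y true (acc + 1) ys else runB y true acc ys)
    else runB y false acc ys

theorem foldB_eq_runB (l : List Int) : ∀ (prev : Int) (flag : Bool) (acc : Int),
    (((prev :: l).zip l).foldl stepB (acc, flag)).1 = runB prev flag acc l := by
  induction l with
  | nil => intro prev flag acc; simp [runB]
  | cons y ys ih =>
    intro prev flag acc
    simp only [List.zip_cons_cons, List.foldl_cons]
    by_cases h : y = prev
    · by_cases hf : flag = false <;> simp [stepB, h, hf, runB, ih]
    · simp [stepB, h, runB, ih]

-- the main invariant, both flag states at once (mutual, so by strong induction on length)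
theorem runB_spec : ∀ (n : Nat) (xs : List Int), xs.length ≤ n → ∀ (prev : Int) (acc : Int),
    runB prev false acc xs = acc + countClumps (prev :: xs) ∧
    runB prev true acc xs = acc + countClumps (chompA prev xs).2 := by
  intro n
  induction n with
  | zero =>
    intro xs h prev acc
    have : xs = [] := List.length_eq_zero_iff.mp (Nat.le_zero.mp h)
    subst this
    simp [runB, chompA, countClumps_nil, countClumps_cons]
  | succ n ih =>
    intro xs h prev acc
    match xs with
    | [] => simp [runB, chompA, countClumps_nil, countClumps_cons]
    | y :: ys =>
      have hlen : ys.length ≤ n := by simpa using Nat.lt_succ_iff.mp (Nat.lt_of_lt_of_le (by simp) h)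
      by_cases hy : y = prev
      · subst hy
        constructor
        · -- flag false, matching head: count this run once, continue with flag true
          have hT := (ih ys hlen y (acc + 1)).2
          rw [show runB y false acc (y :: ys) = runB y true (acc + 1) ys by simp [runB]]
          rw [hT]
          rw [countClumps_cons]
          have hc1 : (chompA y (y :: ys)).1 = (chompA y ys).1 + 1 := by simp [chompA]
          have hc2 : (chompA y (y :: ys)).2 = (chompA y ys).2 := by simp [chompA]
          have hnn : 0 ≤ (chompA y ys).1 := by
            clear hc1 hc2 hT
            induction ys with
            | nil => simp [chompA]
            | cons z zs ihz => simp only [chompA]; split <;> simp_all <;> omega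
          rw [hc1, hc2, if_pos (by omega)]
          ring
        · -- flag true, matching head: already counted, just keep consuming the run
          have hT := (ih ys hlen y acc).2
          rw [show runB y true acc (y :: ys) = runB y true acc ys by simp [runB]]
          rw [hT]
          simp [chompA]
      · have hy' : prev ≠ y := fun h => hy h.symm
        constructor
        · -- flag false, different head: current singleton run contributes 0
          have hF := (ih ys hlen y acc).1
          rw [show runB prev false acc (y :: ys) = runB y false acc ys by simp [runB, hy]]
          rw [hF]
          have hch : chompA prev (y :: ys) = (0, y :: ys) := by
            simp [chompA, hy']
          conv_rhs => rw [countClumps_cons, hch]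
          norm_num
        · -- flag true, different head: run ends, restart with flag false
          have hF := (ih ys hlen y acc).1
          rw [show runB prev true acc (y :: ys) = runB y false acc ys by simp [runB, hy]]
          rw [hF]
          have hch : chompA prev (y :: ys) = (0, y :: ys) := by
            simp [chompA, hy']
          rw [hch]

-- ===== VERDICT (by name: the statement is the Claim_ definition above) =====
theorem countClumps_spec : Claim_equal_countClumps := by
  intro nums _
  unfold Spec_countClumps countClumps_alt
  match nums with
  | [] => simp [countClumps_nil]
  | x :: xs =>
    have h := foldB_eq_runB xs x false 0
    simp only [List.drop_one, List.tail_cons] at *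
    rw [h, (runB_spec xs.length xs (le_refl _) x 0).1]
    omega
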